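-- pv_equiv track=rewrite | github.com/wojciechGaudnik/CodeWars | Python/kyu6HowManyReindeers.py | reindeer
-- ===== SOURCE A (Python) =====
-- def reindeer(presents):
-- 	if presents > 180:
-- 		raise ValueError
-- 	answer = 2
-- 	while presents > 0:
-- 		answer += 1
-- 		presents -= 30
-- 	return answer
-- ===== SOURCE B (Python) =====
-- def reindeer(presents):
--     if presents > 180:
--         raise ValueError
--     if presents <= 0:
--         return 2
--     return 2 + -(-presents // 30)
-- ===== Notes on version B (the rewrite author's own statement) =====
-- stated objective: simpler
-- what changed: Replaces the repeated-subtraction while loop with a closed-form ceiling division 2 + ceil(presents/30).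
-- outside the precondition, e.g. on reindeer(181): A raises ValueError, B raises ValueError
import Mathlib
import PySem

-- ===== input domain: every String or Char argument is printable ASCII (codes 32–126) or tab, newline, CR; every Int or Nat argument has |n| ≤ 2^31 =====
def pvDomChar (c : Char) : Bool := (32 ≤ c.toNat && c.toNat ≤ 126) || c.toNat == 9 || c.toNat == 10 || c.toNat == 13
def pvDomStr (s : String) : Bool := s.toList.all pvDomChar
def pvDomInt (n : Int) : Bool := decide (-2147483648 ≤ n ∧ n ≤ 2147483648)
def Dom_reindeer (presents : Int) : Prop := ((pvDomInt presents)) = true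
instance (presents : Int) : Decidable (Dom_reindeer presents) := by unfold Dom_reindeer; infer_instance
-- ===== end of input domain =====

-- B replaces the repeated-subtraction loop with a closed-form ceiling division (simpler).
-- ===== PORT A =====
-- while presents > 0: answer += 1; presents -= 30
def reindeerLoop (answer presents : Int) : Int :=
  if presents > 0 then reindeerLoop (answer + 1) (presents - 30) else answer
  termination_by presents.toNat
  decreasing_by omega

def reindeer (presents : Int) : Int := reindeerLoop 2 presents

-- ===== PORT B =====
def reindeer_alt (presents : Int) : Int :=
  if presents ≤ 0 then 2 else 2 + -(PySem.Int.floordiv (-presents) 30)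

-- ===== PRECONDITION & SPEC =====
-- A raises ValueError when presents > 180; those inputs are excluded.
def Pre_reindeer (presents : Int) : Prop := presents ≤ 180
instance (presents : Int) : Decidable (Pre_reindeer presents) := by unfold Pre_reindeer; infer_instance
def pvWitness_reindeer : Int := (65)

def Spec_reindeer (presents : Int) (out : Int) : Prop := out = reindeer_alt presents
instance (presents : Int) (out : Int) : Decidable (Spec_reindeer presents out) := by unfold Spec_reindeer; infer_instance

-- ===== CLAIM (what is proved, stated in full; the proofs are below) =====
def Claim_equal_reindeer : Prop := ∀ (presents : Int), Dom_reindeer presents → Pre_reindeer presents → Spec_reindeer presents (reindeer presents)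

-- ===== LEMMAS AND PROOFS =====
theorem reindeerLoop_eq (answer presents : Int) :
    reindeerLoop answer presents =
      answer + (if presents ≤ 0 then 0 else -(PySem.Int.floordiv (-presents) 30)) := by
  fun_induction reindeerLoop answer presents with
  | case1 a p hp ih =>
      rw [ih]
      simp only [PySem.Int.floordiv_eq_ediv_of_pos (by norm_num : (0:Int) < 30)]
      split_ifs <;> omega
  | case2 a p hp =>
      rw [if_pos (by omega)]; omega

-- ===== VERDICT (by name: the statement is the Claim_ definition above) =====
theorem reindeer_spec : Claim_equal_reindeer := by
  intro presents _ _
  unfold Spec_reindeer reindeer reindeer_alt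
  rw [reindeerLoop_eq]
  split_ifs <;> omega
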